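-- pv_equiv track=rewrite | github.com/cedricleroy/aoc2020 | day6/part2.py | sum_of_yes
-- ===== SOURCE A (Python) =====
-- from typing import List
--
-- def all_persons_have_letter(group: List[str], letter: str) -> bool:
--     for person in group:
--         if letter not in person:
--             return False
--     return True
--
-- def sum_of_yes(groups: List[List[str]]) -> int:
--     count = 0
--     for group in groups:
--         letters = {c for c in "".join(group)}
--         for letter in letters:
--             if all_persons_have_letter(group, letter):
--                 count += 1
--     return count
-- ===== SOURCE B (Python) =====
-- from typing import List
--
-- def sum_of_yes(groups: List[List[str]]) -> int:
--     total = 0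
--     for group in groups:
--         if group:
--             common = set(group[0])
--             for person in group[1:]:
--                 common &= set(person)
--             total += len(common)
--     return total
-- ===== Notes on version B (the rewrite author's own statement) =====
-- stated objective: simpler
-- what changed: Per group, B maintains a shrinking set intersection of each person's character set (seeded from the first person) instead of A's building the union of all letters and re-scanning every person for each candidate letter.
import Mathlib
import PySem

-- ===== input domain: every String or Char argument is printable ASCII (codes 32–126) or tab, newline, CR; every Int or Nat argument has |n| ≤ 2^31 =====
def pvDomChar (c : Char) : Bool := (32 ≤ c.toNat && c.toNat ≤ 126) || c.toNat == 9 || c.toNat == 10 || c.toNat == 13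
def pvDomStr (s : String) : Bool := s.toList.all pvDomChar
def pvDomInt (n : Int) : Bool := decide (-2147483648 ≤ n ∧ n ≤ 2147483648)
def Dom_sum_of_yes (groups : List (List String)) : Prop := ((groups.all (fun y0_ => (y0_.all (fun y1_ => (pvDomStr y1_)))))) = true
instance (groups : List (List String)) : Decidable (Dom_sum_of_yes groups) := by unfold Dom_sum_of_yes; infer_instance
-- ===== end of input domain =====

-- B replaces A's per-letter rescan of every person with one pass of shrinking set intersections per group; objective: simpler.

-- ===== PORT A =====
-- 'letter in person' on a single char = char membership; the loop with early 'return False' is List.all.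
def all_persons_have_letter (group : List String) (letter : Char) : Bool :=
  group.all (fun person => person.toList.contains letter)

-- ''.join(group) iterated as chars = (group.map String.toList).flatten (exact: concatenation of the chars).
def sum_of_yes (groups : List (List String)) : Int :=
  groups.foldl (fun count group =>
    let letters : PySem.Set Char := PySem.Set.ofList ((group.map String.toList).flatten)
    letters.foldl (fun count letter =>
      if all_persons_have_letter group letter then count + 1 else count) count) 0

-- ===== PORT B =====
def sum_of_yes_alt (groups : List (List String)) : Int :=
  groups.foldl (fun total group =>
    match group with
    | [] => total
    | h :: t =>
      let common : PySem.Set Char :=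
        t.foldl (fun s person => PySem.Set.inter s (PySem.Set.ofList person.toList))
          (PySem.Set.ofList h.toList)
      total + (common.length : Int)) 0

-- ===== PRECONDITION & SPEC =====
def Spec_sum_of_yes (groups : List (List String)) (out : Int) : Prop := out = sum_of_yes_alt groups
instance (groups : List (List String)) (out : Int) : Decidable (Spec_sum_of_yes groups out) := by unfold Spec_sum_of_yes; infer_instance

-- ===== CLAIM (what is proved, stated in full; the proofs are below) =====
def Claim_equal_sum_of_yes : Prop := ∀ (groups : List (List String)), Dom_sum_of_yes groups → Spec_sum_of_yes groups (sum_of_yes groups)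

-- ===== LEMMAS AND PROOFS =====

-- membership in B's intersection fold
theorem memInterFold (t : List String) (s : List Char) (c : Char) :
    c ∈ t.foldl (fun s person => PySem.Set.inter s (PySem.Set.ofList person.toList)) s ↔
      c ∈ s ∧ ∀ p ∈ t, c ∈ p.toList := by
  induction t generalizing s with
  | nil => simp
  | cons p t ih =>
    simp only [List.foldl_cons, ih, PySem.Set.mem_inter, PySem.Set.mem_ofList, List.mem_cons]
    aesop

-- B's intersection fold keeps the set duplicate-free
theorem nodupInterFold (t : List String) (s : List Char) (hs : s.Nodup) :
    (t.foldl (fun s person => PySem.Set.inter s (PySem.Set.ofList person.toList)) s).Nodup := by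
  induction t generalizing s with
  | nil => exact hs
  | cons p t ih => exact ih _ (PySem.Set.nodup_inter _ _ hs)

-- per-group agreement: A's filtered letter set and B's intersection have the same length
theorem groupEq (h : String) (t : List String) :
    ((PySem.Set.ofList (((h :: t).map String.toList).flatten)).countP
        (all_persons_have_letter (h :: t)) : Int)
      = ((t.foldl (fun s person => PySem.Set.inter s (PySem.Set.ofList person.toList))
          (PySem.Set.ofList h.toList)).length : Int) := by
  have hperm :
      ((PySem.Set.ofList (((h :: t).map String.toList).flatten)).filter
          (all_persons_have_letter (h :: t))).Perm
        (t.foldl (fun s person => PySem.Set.inter s (PySem.Set.ofList person.toList))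
          (PySem.Set.ofList h.toList)) := by
    rw [List.perm_ext_iff_of_nodup (List.Nodup.filter _ (PySem.Set.nodup_ofList _))
        (nodupInterFold _ _ (PySem.Set.nodup_ofList _))]
    intro c
    simp only [List.mem_filter, PySem.Set.mem_ofList, memInterFold,
      all_persons_have_letter, List.all_eq_true, List.contains_iff_mem,
      List.mem_flatten, List.mem_map]
    constructor
    · rintro ⟨-, hall⟩
      exact ⟨hall h (List.mem_cons_self ..), fun p hp => hall p (List.mem_cons_of_mem _ hp)⟩
    · rintro ⟨hh, hall⟩
      refine ⟨⟨h.toList, ⟨h, List.mem_cons_self .., rfl⟩, hh⟩, ?_⟩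
      intro p hp
      rcases List.mem_cons.mp hp with rfl | hp
      · exact hh
      · exact hall p hp
  rw [List.countP_eq_length_filter, hperm.length_eq]

-- A's inner loop over the letter set counts the letters passing the test
theorem innerCount (group : List String) (letters : List Char) (a : Int) :
    letters.foldl (fun count letter =>
        if all_persons_have_letter group letter then count + 1 else count) a
      = a + (letters.countP (all_persons_have_letter group) : Int) :=
  PySem.List.foldl_if_add_one _ _ _

-- the two outer folds agree from any common accumulator
theorem outerEq (groups : List (List String)) (a : Int) :
    groups.foldl (fun count group =>
        (PySem.Set.ofList ((group.map String.toList).flatten)).foldl (fun count letter =>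
          if all_persons_have_letter group letter then count + 1 else count) count) a
      = groups.foldl (fun total group =>
          match group with
          | [] => total
          | h :: t => total +
              ((t.foldl (fun s person => PySem.Set.inter s (PySem.Set.ofList person.toList))
                (PySem.Set.ofList h.toList)).length : Int)) a := by
  induction groups generalizing a with
  | nil => rfl
  | cons g gs ih =>
    simp only [List.foldl_cons]
    rw [innerCount]
    cases g with
    | nil => simpa using ih a
    | cons h t => rw [groupEq]; exact ih _

-- ===== VERDICT (by name: the statement is the Claim_ definition above) =====
theorem sum_of_yes_spec : Claim_equal_sum_of_yes := by
  intro groups _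
  unfold Spec_sum_of_yes sum_of_yes sum_of_yes_alt
  exact outerEq groups 0
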